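-- pv_equiv track=rewrite | github.com/ovsrobot/dpdk | devtools/dpdk-checkpatch.py | split_mbox
-- ===== SOURCE A (Python) =====
-- def split_mbox(content: str) -> list[str]:
--     """Split an mbox file into individual messages.
--
--     Mbox format uses 'From ' at the start of a line as message separator.
--     """
--     messages = []
--     current = []
--
--     for line in content.split('\n'):
--         # Standard mbox separator: line starting with "From " followed by
--         # an address or identifier and a date
--         if line.startswith('From ') and current:
--             messages.append('\n'.join(current))
--             current = [line]
--         else:
--             current.append(line)
--
--     if current:
--         messages.append('\n'.join(current))
--
--     return messages
-- ===== SOURCE B (Python) =====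
-- def _span_body(lines):
--     """Split lines at the first 'From ' separator: (prefix before it, suffix from it)."""
--     for j, line in enumerate(lines):
--         if line.startswith('From '):
--             return lines[:j], lines[j:]
--     return lines, []
--
--
-- def split_mbox(content: str) -> list[str]:
--     """Split an mbox file into individual messages.
--
--     Chunked scan: repeatedly split the remaining lines at the next
--     'From ' separator and emit one whole message per iteration.
--     """
--     lines = content.split('\n')
--     messages = []
--     head, rest = lines[0], lines[1:]
--     while True:
--         body, tail = _span_body(rest)
--         messages.append('\n'.join([head] + body))
--         if not tail:
--             return messages
--         head, rest = tail[0], tail[1:]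
-- ===== Notes on version B (the rewrite author's own statement) =====
-- stated objective: alternative
-- what changed: B works in chunks: it repeatedly splits the remaining lines at the next 'From ' separator and emits one whole message per iteration, instead of A's line-by-line pass with a flush-on-separator accumulator.
import Mathlib
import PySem

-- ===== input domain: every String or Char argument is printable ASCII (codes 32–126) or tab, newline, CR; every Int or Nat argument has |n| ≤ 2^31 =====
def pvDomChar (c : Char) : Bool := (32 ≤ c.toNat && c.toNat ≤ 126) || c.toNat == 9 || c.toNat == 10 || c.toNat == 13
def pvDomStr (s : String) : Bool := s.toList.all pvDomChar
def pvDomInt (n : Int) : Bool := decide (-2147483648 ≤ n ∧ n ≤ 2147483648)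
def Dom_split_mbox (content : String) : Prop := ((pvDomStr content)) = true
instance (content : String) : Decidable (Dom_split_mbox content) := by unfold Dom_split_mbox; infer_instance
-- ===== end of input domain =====

-- B replaces A's line-by-line flush-on-separator accumulator by a chunked scan that
-- repeatedly splits the remaining lines at the next 'From ' separator; equal on all inputs.
-- ===== PORT A =====
-- loop body of A: state = (messages, current)
def stepA (st : List String × List String) (line : String) : List String × List String :=
  if PySem.Str.startswith line "From " && !st.2.isEmpty then
    (st.1 ++ [PySem.Str.join "\n" st.2], [line])
  else
    (st.1, st.2 ++ [line])

def split_mbox (content : String) : List String :=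
  let lines := (PySem.Str.split? content "\n").getD []   -- sep "\n" ≠ "", so split? is always `some`
  let r := lines.foldl stepA ([], [])
  if !r.2.isEmpty then r.1 ++ [PySem.Str.join "\n" r.2] else r.1

-- ===== PORT B =====
-- Source B's `while True` loop as tail recursion; `_span_body rest` is exactly
-- (rest.takeWhile (no separator), rest.dropWhile (no separator)): the prefix before
-- the first 'From ' line and the suffix from it.
def splitLoop (msgs : List String) (head : String) (rest : List String) : List String :=
  let body := rest.takeWhile (fun l => !PySem.Str.startswith l "From ")
  match h : rest.dropWhile (fun l => !PySem.Str.startswith l "From ") with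
  | [] => msgs ++ [PySem.Str.join "\n" (head :: body)]
  | r0 :: rs => splitLoop (msgs ++ [PySem.Str.join "\n" (head :: body)]) r0 rs
termination_by rest.length
decreasing_by
  have h1 : (rest.dropWhile (fun l => !PySem.Str.startswith l "From ")).length ≤ rest.length :=
    List.length_dropWhile_le _ _
  rw [h] at h1; simp at h1; omega

def split_mbox_alt (content : String) : List String :=
  let lines := (PySem.Str.split? content "\n").getD []
  match lines with
  | [] => []   -- unreachable: str.split never returns an empty list
  | l0 :: ls => splitLoop [] l0 ls

-- ===== PRECONDITION & SPEC =====
def Spec_split_mbox (content : String) (out : List String) : Prop := out = split_mbox_alt content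
instance (content : String) (out : List String) : Decidable (Spec_split_mbox content out) := by unfold Spec_split_mbox; infer_instance

-- ===== CLAIM (what is proved, stated in full; the proofs are below) =====
def Claim_equal_split_mbox : Prop := ∀ (content : String), Dom_split_mbox content → Spec_split_mbox content (split_mbox content)

-- ===== LEMMAS AND PROOFS =====

-- spec of A's loop from a nonempty accumulator: chunking from the left
def fA (cur : List String) : List String → List String
  | [] => [PySem.Str.join "\n" cur]
  | l :: ls =>
    if PySem.Str.startswith l "From " then
      PySem.Str.join "\n" cur :: fA [l] ls
    else
      fA (cur ++ [l]) ls

theorem loopA_eq_fA (ls : List String) : ∀ (msgs cur : List String), cur ≠ [] →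
    (let r := ls.foldl stepA (msgs, cur);
     if !r.2.isEmpty then r.1 ++ [PySem.Str.join "\n" r.2] else r.1) = msgs ++ fA cur ls := by
  induction ls with
  | nil =>
    intro msgs cur hc
    simp [fA, hc]
  | cons l ls ih =>
    intro msgs cur hc
    by_cases h : PySem.Chars.startswith l.toList ['F','r','o','m',' '] = true
    · have : stepA (msgs, cur) l = (msgs ++ [PySem.Str.join "\n" cur], [l]) := by
        simp [stepA, h, hc]
      simp only [List.foldl_cons, this]
      rw [ih (msgs ++ [PySem.Str.join "\n" cur]) [l] (by simp)]
      simp [fA, h]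
    · simp only [Bool.not_eq_true] at h
      have : stepA (msgs, cur) l = (msgs, cur ++ [l]) := by simp [stepA, h]
      simp only [List.foldl_cons, this]
      rw [ih msgs (cur ++ [l]) (by simp)]
      simp [fA, h]

-- fA consumes a whole separator-free chunk at once
theorem fA_chunk (ls : List String) : ∀ cur : List String,
    fA cur ls =
      match ls.dropWhile (fun l => !PySem.Str.startswith l "From ") with
      | [] => [PySem.Str.join "\n" (cur ++ ls.takeWhile (fun l => !PySem.Str.startswith l "From "))]
      | r0 :: rs => PySem.Str.join "\n" (cur ++ ls.takeWhile (fun l => !PySem.Str.startswith l "From ")) :: fA [r0] rs := by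
  induction ls with
  | nil => intro cur; simp [fA]
  | cons l ls ih =>
    intro cur
    by_cases h : PySem.Chars.startswith l.toList ['F','r','o','m',' '] = true
    · simp [fA, List.dropWhile, List.takeWhile, h]
    · simp only [Bool.not_eq_true] at h
      simp [fA, List.dropWhile, List.takeWhile, h, ih (cur ++ [l])]

theorem splitLoop_eq : ∀ (n : Nat) (rest : List String), rest.length ≤ n →
    ∀ (msgs : List String) (head : String), splitLoop msgs head rest = msgs ++ fA [head] rest := by
  intro n
  induction n with
  | zero =>
    intro rest h msgs head
    have : rest = [] := by cases rest <;> simp_all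
    subst this
    rw [splitLoop]
    simp [fA]
  | succ n ih =>
    intro rest h msgs head
    rw [splitLoop, fA_chunk]
    cases hd : rest.dropWhile (fun l => !PySem.Str.startswith l "From ") with
    | nil => simp
    | cons r0 rs =>
      have h1 : (rest.dropWhile (fun l => !PySem.Str.startswith l "From ")).length ≤ rest.length :=
        List.length_dropWhile_le _ _
      rw [hd] at h1
      simp only [List.length_cons] at h1
      simp [ih rs (by omega)]

-- ===== VERDICT (by name: the statement is the Claim_ definition above) =====
theorem split_mbox_spec : Claim_equal_split_mbox := by
  intro content _
  unfold Spec_split_mbox split_mbox split_mbox_alt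
  cases hl : (PySem.Str.split? content "\n").getD [] with
  | nil => simp
  | cons l0 ls =>
    have h0 : stepA ([], []) l0 = ([], [l0]) := by simp [stepA]
    simp only [List.foldl_cons, h0]
    have := loopA_eq_fA ls [] [l0] (by simp)
    simp only at this
    rw [this, splitLoop_eq ls.length ls le_rfl]
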